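-- pv_equiv track=rewrite | github.com/RonanChang/Data_Structures | week3_recursion/Assignment[3]/problem_3.py | recur_iteration
-- ===== SOURCE A (Python) =====
-- def recur_iteration(n):
--     result = 0
--
--     if n < 0:
--         return -1
--
--     while n > 0:
--         result += 1
--         n = n //10
--
--     return result
-- ===== SOURCE B (Python) =====
-- def recur_iteration(n):
--     if n < 0:
--         return -1
--     if n == 0:
--         return 0
--     return 1 + recur_iteration(n // 10)
-- ===== Notes on version B (the rewrite author's own statement) =====
-- stated objective: alternative
-- what changed: Replaces the while-loop with an explicit accumulator by a direct self-recursion on the tens-quotient, with base cases for negative and zero input.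
import Mathlib
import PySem

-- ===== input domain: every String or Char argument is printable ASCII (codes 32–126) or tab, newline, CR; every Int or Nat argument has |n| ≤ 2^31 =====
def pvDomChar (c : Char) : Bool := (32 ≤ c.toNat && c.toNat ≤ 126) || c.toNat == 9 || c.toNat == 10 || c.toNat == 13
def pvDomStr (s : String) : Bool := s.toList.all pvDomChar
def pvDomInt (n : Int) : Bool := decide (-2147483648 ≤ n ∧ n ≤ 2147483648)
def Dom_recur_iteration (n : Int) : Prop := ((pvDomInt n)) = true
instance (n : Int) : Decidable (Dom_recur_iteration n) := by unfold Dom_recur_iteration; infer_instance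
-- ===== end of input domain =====

-- B replaces A's while-loop/accumulator by a direct recursion 1 + f(n//10); same cost (alternative decomposition).

theorem pv_fdiv10_lt (n : Int) (h : 0 < n) : (n.fdiv 10).toNat < n.toNat := by
  rw [Int.fdiv_eq_ediv]
  omega

-- ===== PORT A =====
-- the while-loop of A: state (result, n), iterate while n > 0
def recur_iteration_loop (result : Int) (n : Int) : Int :=
  if h : n > 0 then recur_iteration_loop (result + 1) (PySem.Int.floordiv n 10) else result
termination_by n.toNat
decreasing_by
  simp only [PySem.Int.floordiv]
  exact pv_fdiv10_lt _ (by omega)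

def recur_iteration (n : Int) : Int :=
  if n < 0 then -1 else recur_iteration_loop 0 n

-- ===== PORT B =====
def recur_iteration_alt (n : Int) : Int :=
  if h : n < 0 then -1
  else if h0 : n = 0 then 0
  else 1 + recur_iteration_alt (PySem.Int.floordiv n 10)
termination_by n.toNat
decreasing_by
  simp only [PySem.Int.floordiv]
  exact pv_fdiv10_lt _ (by omega)

-- ===== PRECONDITION & SPEC =====
def Spec_recur_iteration (n : Int) (out : Int) : Prop := out = recur_iteration_alt n
instance (n : Int) (out : Int) : Decidable (Spec_recur_iteration n out) := by unfold Spec_recur_iteration; infer_instance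

-- ===== CLAIM (what is proved, stated in full; the proofs are below) =====
def Claim_equal_recur_iteration : Prop := ∀ (n : Int), Dom_recur_iteration n → Spec_recur_iteration n (recur_iteration n)

-- ===== LEMMAS AND PROOFS =====

-- loop invariant: for n ≥ 0, the loop adds B's digit count of n to the accumulator
theorem recur_iteration_loop_eq : ∀ (k : Nat) (n : Int), n.toNat ≤ k → 0 ≤ n →
    ∀ (result : Int), recur_iteration_loop result n = result + recur_iteration_alt n := by
  intro k
  induction k with
  | zero =>
    intro n hk hn result
    have h0 : n = 0 := by omega
    subst h0
    rw [recur_iteration_loop, recur_iteration_alt]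
    norm_num
  | succ k ih =>
    intro n hk hn result
    by_cases hpos : n > 0
    · rw [recur_iteration_loop]
      simp only [hpos, dif_pos]
      have hlt := pv_fdiv10_lt n hpos
      have hdiv : (0:Int) ≤ PySem.Int.floordiv n 10 := by
        simp only [PySem.Int.floordiv]
        rw [Int.fdiv_eq_ediv]; omega
      rw [ih _ (by simp only [PySem.Int.floordiv]; omega) hdiv]
      conv_rhs => rw [recur_iteration_alt]
      have h1 : ¬ n < 0 := by omega
      have h2 : n ≠ 0 := by omega
      simp only [h1, h2, dif_neg, not_false_iff]
      ring
    · have h0 : n = 0 := by omega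
      subst h0
      rw [recur_iteration_loop, recur_iteration_alt]
      norm_num

-- ===== VERDICT (by name: the statement is the Claim_ definition above) =====
theorem recur_iteration_spec : Claim_equal_recur_iteration := by
  intro n _
  unfold Spec_recur_iteration recur_iteration
  by_cases h : n < 0
  · simp only [h, if_pos]
    rw [recur_iteration_alt]
    simp [h]
  · simp only [h, if_neg, not_false_iff]
    rw [recur_iteration_loop_eq n.toNat n (le_refl _) (by omega) 0]
    ring
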